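-- pv_equiv track=rewrite | github.com/jesperfjellin-kv/Omkod_NRL_til_FKB | omkod_NRL_til_FKB.py | remove_unwanted_objects
-- ===== SOURCE A (Python) =====
-- def remove_unwanted_objects(lines):
--     """
--     Fjerner hele objekter basert på spesifikke kriterier, som objekttype.
--     """
--     processed_lines = []
--     current_object = []
--     remove_current_object = False
--
--     for line in lines:
--         if line.startswith('.PUNKT') or line.startswith('.KURVE') or (line.strip() == '' and current_object):
--             if not remove_current_object:
--                 processed_lines.extend(current_object)
--                 if line.strip() == '':
--                     processed_lines.append('\n')
--
--             current_object = []
--             remove_current_object = False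
--
--         current_object.append(line)
--
--         if '..objtype' in line.lower() and 'nrlpunkt' in line.lower():
--             # Fjerner alle instanser av objektet nrlpunkt
--             remove_current_object = True
--
--     if current_object and not remove_current_object:
--         processed_lines.extend(current_object)
--
--     return processed_lines
-- ===== SOURCE B (Python) =====
-- def remove_unwanted_objects(lines):
--     # Pass 1: cut the stream into closed segments (lines, removed?, ended-by-blank?);
--     # the trigger line starts the NEXT segment, per the original ordering.
--     segments = []
--     seg, removed = [], False
--     for line in lines:
--         blank = line.strip() == ''
--         if line.startswith('.PUNKT') or line.startswith('.KURVE') or (blank and seg):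
--             segments.append((seg, removed, blank))
--             seg, removed = [], False
--         seg.append(line)
--         low = line.lower()
--         if '..objtype' in low and 'nrlpunkt' in low:
--             removed = True
--     # Pass 2: assemble the kept segments.
--     out = []
--     for s, r, b in segments:
--         if not r:
--             out.extend(s)
--             if b:
--                 out.append('\n')
--     if seg and not removed:
--         out.extend(seg)
--     return out
-- ===== Notes on version B (the rewrite author's own statement) =====
-- stated objective: alternative
-- what changed: B replaces A's single stateful flush-as-you-go loop by a two-pass decomposition: pass 1 cuts the stream into closed segment records (lines, removed-flag, ended-by-blank flag), pass 2 assembles the output from the kept segments.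
import Mathlib
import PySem

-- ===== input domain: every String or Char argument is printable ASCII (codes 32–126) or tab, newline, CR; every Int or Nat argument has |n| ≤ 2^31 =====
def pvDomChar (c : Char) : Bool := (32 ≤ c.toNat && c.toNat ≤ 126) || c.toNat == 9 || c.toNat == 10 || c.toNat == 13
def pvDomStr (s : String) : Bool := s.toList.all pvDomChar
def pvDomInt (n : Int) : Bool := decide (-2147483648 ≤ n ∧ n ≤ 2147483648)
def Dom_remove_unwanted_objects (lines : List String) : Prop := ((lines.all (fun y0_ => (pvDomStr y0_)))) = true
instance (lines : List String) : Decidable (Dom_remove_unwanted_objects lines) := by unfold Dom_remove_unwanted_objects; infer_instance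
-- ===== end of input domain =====

-- B replaces A's single stateful flush-as-you-go loop by a two-pass decomposition
-- (segment the stream, then assemble kept segments); objective: alternative, same cost.

-- ===== PORT A =====
-- loop body of A's single for-loop, state = (processed_lines, current_object, remove_current_object)
def pvStepA : (List String × List String × Bool) → String → List String × List String × Bool
  | (processed, current, rem), line =>
    let (processed, current, rem) :=
      if PySem.Str.startswith line ".PUNKT" || PySem.Str.startswith line ".KURVE" ||
         (PySem.Str.strip line == "" && !current.isEmpty) then
        ((if !rem then processed ++ current ++ (if PySem.Str.strip line == "" then ["\n"] else []) else processed),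
         ([] : List String), false)
      else (processed, current, rem)
    let current := current ++ [line]
    let rem := if PySem.Str.isIn "..objtype" (PySem.Str.lower line) &&
                  PySem.Str.isIn "nrlpunkt" (PySem.Str.lower line) then true else rem
    (processed, current, rem)

def remove_unwanted_objects (lines : List String) : List String :=
  let st := lines.foldl pvStepA ([], [], false)
  if !st.2.1.isEmpty && !st.2.2 then st.1 ++ st.2.1 else st.1

-- ===== PORT B =====
-- pass-1 loop body: state = (segments, seg, removed); each closed segment is (lines, removed, ended_by_blank)
def pvStepB : (List (List String × Bool × Bool) × List String × Bool) → String →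
    List (List String × Bool × Bool) × List String × Bool
  | (segments, seg, removed), line =>
    let blank := PySem.Str.strip line == ""
    let (segments, seg, removed) :=
      if PySem.Str.startswith line ".PUNKT" || PySem.Str.startswith line ".KURVE" ||
         (blank && !seg.isEmpty) then
        (segments ++ [(seg, removed, blank)], ([] : List String), false)
      else (segments, seg, removed)
    let seg := seg ++ [line]
    let low := PySem.Str.lower line
    let removed := if PySem.Str.isIn "..objtype" low && PySem.Str.isIn "nrlpunkt" low then true else removed
    (segments, seg, removed)

def remove_unwanted_objects_alt (lines : List String) : List String :=
  let st := lines.foldl pvStepB ([], [], false)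
  let out := st.1.foldl
    (fun out s => if !s.2.1 then out ++ s.1 ++ (if s.2.2 then ["\n"] else []) else out) []
  if !st.2.1.isEmpty && !st.2.2 then out ++ st.2.1 else out

-- ===== PRECONDITION & SPEC =====
def Spec_remove_unwanted_objects (lines : List String) (out : List String) : Prop := out = remove_unwanted_objects_alt lines
instance (lines : List String) (out : List String) : Decidable (Spec_remove_unwanted_objects lines out) := by unfold Spec_remove_unwanted_objects; infer_instance

-- ===== CLAIM (what is proved, stated in full; the proofs are below) =====
def Claim_equal_remove_unwanted_objects : Prop := ∀ (lines : List String), Dom_remove_unwanted_objects lines → Spec_remove_unwanted_objects lines (remove_unwanted_objects lines)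

-- ===== LEMMAS AND PROOFS =====

-- what a closed segment contributes to the output
def pvEmit (s : List String × Bool × Bool) : List String :=
  if !s.2.1 then s.1 ++ (if s.2.2 then ["\n"] else []) else []

theorem pvPass2_eq : ∀ (segs : List (List String × Bool × Bool)) (out : List String),
    segs.foldl (fun out s => if !s.2.1 then out ++ s.1 ++ (if s.2.2 then ["\n"] else []) else out) out
      = out ++ segs.flatMap pvEmit := by
  intro segs
  induction segs with
  | nil => intro out; simp
  | cons s rest ih =>
    intro out
    simp only [List.foldl_cons, List.flatMap_cons, ih, pvEmit]
    by_cases h : s.2.1 = true <;> simp [h]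

theorem pvFold_rel : ∀ (rest : List String) (segs : List (List String × Bool × Bool))
    (cur : List String) (rem : Bool),
    rest.foldl pvStepA (segs.flatMap pvEmit, cur, rem)
      = ((rest.foldl pvStepB (segs, cur, rem)).1.flatMap pvEmit,
         (rest.foldl pvStepB (segs, cur, rem)).2) := by
  intro rest
  induction rest with
  | nil => intro segs cur rem; rfl
  | cons line rest ih =>
    intro segs cur rem
    simp only [List.foldl_cons]
    by_cases h : (PySem.Str.startswith line ".PUNKT" || PySem.Str.startswith line ".KURVE" ||
        (PySem.Str.strip line == "" && !cur.isEmpty)) = true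
    · have hA : pvStepA (segs.flatMap pvEmit, cur, rem) line
          = ((segs ++ [(cur, rem, PySem.Str.strip line == "")]).flatMap pvEmit, [line],
             if PySem.Str.isIn "..objtype" (PySem.Str.lower line) &&
                PySem.Str.isIn "nrlpunkt" (PySem.Str.lower line) then true else false) := by
        simp only [pvStepA, if_pos h]
        cases rem <;> simp [pvEmit]
      have hB : pvStepB (segs, cur, rem) line
          = (segs ++ [(cur, rem, PySem.Str.strip line == "")], [line],
             if PySem.Str.isIn "..objtype" (PySem.Str.lower line) &&
                PySem.Str.isIn "nrlpunkt" (PySem.Str.lower line) then true else false) := by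
        simp only [pvStepB, if_pos h, List.nil_append]
      rw [hA, hB]
      exact ih _ _ _
    · have hA : pvStepA (segs.flatMap pvEmit, cur, rem) line
          = (segs.flatMap pvEmit, cur ++ [line],
             if PySem.Str.isIn "..objtype" (PySem.Str.lower line) &&
                PySem.Str.isIn "nrlpunkt" (PySem.Str.lower line) then true else rem) := by
        simp only [pvStepA, if_neg h]
      have hB : pvStepB (segs, cur, rem) line
          = (segs, cur ++ [line],
             if PySem.Str.isIn "..objtype" (PySem.Str.lower line) &&
                PySem.Str.isIn "nrlpunkt" (PySem.Str.lower line) then true else rem) := by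
        simp only [pvStepB, if_neg h]
      rw [hA, hB]
      exact ih _ _ _

-- ===== VERDICT (by name: the statement is the Claim_ definition above) =====
theorem remove_unwanted_objects_spec : Claim_equal_remove_unwanted_objects := by
  intro lines _
  unfold Spec_remove_unwanted_objects remove_unwanted_objects remove_unwanted_objects_alt
  have h := pvFold_rel lines [] [] false
  simp only [List.flatMap_nil] at h
  simp only [h, pvPass2_eq, List.nil_append]
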